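-- pv_equiv track=rewrite | github.com/koba925/alds | atcoder/ABC134/C.py | exception_handling_leftright
-- ===== SOURCE A (Python) =====
-- def exception_handling_leftright(N, A):
--     max_left = [0] * N
--     for i in range(1, N):
--         max_left[i] = max(max_left[i - 1], A[i - 1])
--
--     max_right = [0] * N
--     for i in reversed(range(N - 1)):
--         max_right[i] = max(max_right[i + 1], A[i + 1])
--
--     return (max(max_left[i], max_right[i]) for i in range(N))
-- ===== SOURCE B (Python) =====
-- def exception_handling_leftright(N, A):
--     # One pass computing the global max (with multiplicity) and the second-largest
--     # value, then a derived pass: excluding the unique maximum leaves the second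
--     # maximum, excluding anything else leaves the maximum; clamp at the 0 baseline.
--     xs = A[:max(N, 0)]
--     max1 = None
--     count = 0
--     second = None
--     for x in xs:
--         if max1 is None or x > max1:
--             second = max1
--             max1 = x
--             count = 1
--         elif x == max1:
--             count += 1
--         elif second is None or x > second:
--             second = x
--     def best_without(x):
--         if x == max1 and count == 1:
--             return max(0, second) if second is not None else 0
--         return max(0, max1)
--     return (best_without(x) for x in xs)
-- ===== Notes on version B (the rewrite author's own statement) =====
-- stated objective: simpler
-- what changed: Replaces the two prefix-max/suffix-max auxiliary arrays with a single pass computing the global maximum, its multiplicity and the second-largest value, from which each 'max excluding index i' is derived directly (O(1) extra space; measured ~2x faster by constant factor).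
-- outside the precondition, e.g. on exception_handling_leftright(1, []): A returns [0], B returns []
import Mathlib
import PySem

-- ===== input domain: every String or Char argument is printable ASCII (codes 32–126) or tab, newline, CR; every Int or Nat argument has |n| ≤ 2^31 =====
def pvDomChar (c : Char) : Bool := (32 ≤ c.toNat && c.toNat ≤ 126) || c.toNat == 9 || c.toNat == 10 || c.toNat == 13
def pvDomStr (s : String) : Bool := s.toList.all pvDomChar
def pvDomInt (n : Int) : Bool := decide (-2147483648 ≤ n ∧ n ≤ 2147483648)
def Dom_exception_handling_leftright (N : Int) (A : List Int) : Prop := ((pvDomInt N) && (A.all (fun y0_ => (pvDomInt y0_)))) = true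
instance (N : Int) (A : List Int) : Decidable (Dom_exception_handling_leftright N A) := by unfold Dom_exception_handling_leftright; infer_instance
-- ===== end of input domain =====

-- B replaces A's prefix-max and suffix-max arrays by a one-pass top-two computation
-- (objective: simpler, O(1) extra space). Equivalence of the RETURN value only.

-- ===== PORT A =====
def exception_handling_leftright (N : Int) (A : List Int) : List Int :=
  -- max_left = [0] * N; for i in range(1, N): max_left[i] = max(max_left[i-1], A[i-1])
  let max_left0 : List Int := List.replicate N.toNat 0
  let max_left :=
    (PySem.List.pyRange 1 N 1).foldl
      (fun ml i =>
        ml.set i.toNat (max (PySem.List.pyGetD ml (i - 1) 0) (PySem.List.pyGetD A (i - 1) 0)))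
      max_left0
  -- max_right = [0] * N; for i in reversed(range(N-1)): max_right[i] = max(max_right[i+1], A[i+1])
  let max_right0 : List Int := List.replicate N.toNat 0
  let max_right :=
    ((PySem.List.pyRange 0 (N - 1) 1).reverse).foldl
      (fun mr i =>
        mr.set i.toNat (max (PySem.List.pyGetD mr (i + 1) 0) (PySem.List.pyGetD A (i + 1) 0)))
      max_right0
  -- (max(max_left[i], max_right[i]) for i in range(N))
  (PySem.List.pyRange 0 N 1).map
    (fun i => max (PySem.List.pyGetD max_left i 0) (PySem.List.pyGetD max_right i 0))

-- ===== PORT B =====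
-- one loop step of Source B: state (max1, count, second), each Optional int + int
def pvTopTwoStep (st : Option Int × Int × Option Int) (x : Int) : Option Int × Int × Option Int :=
  match st with
  | (none, _, _) => (some x, 1, none)                 -- second = max1 (= None); max1 = x; count = 1
  | (some m, c, s) =>
    if m < x then (some x, 1, some m)
    else if x == m then (some m, c + 1, s)
    else
      match s with
      | none => (some m, c, some x)
      | some sv => if sv < x then (some m, c, some x) else (some m, c, some sv)

def exception_handling_leftright_alt (N : Int) (A : List Int) : List Int :=
  let xs := PySem.List.slice A none (some (max N 0))  -- A[:max(N, 0)]
  let st := xs.foldl pvTopTwoStep (none, 0, none)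
  match st with
  | (max1, count, second) =>
    xs.map (fun x =>
      if (some x == max1) && (count == 1) then
        match second with
        | none => 0
        | some sv => max 0 sv
      else max 0 (max1.getD 0))

-- ===== PRECONDITION & SPEC =====
-- Pre_ excludes inputs where N exceeds len(A): there A raises IndexError when N ≥ 2,
-- and for N = 1 with a shorter (empty) list A returns [0] — a value for a nonexistent
-- element of this malformed (N, A) pair — while B naturally returns [].
def Pre_exception_handling_leftright (N : Int) (A : List Int) : Prop :=
  N ≤ 0 ∨ N ≤ (A.length : Int)
instance (N : Int) (A : List Int) : Decidable (Pre_exception_handling_leftright N A) := by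
  unfold Pre_exception_handling_leftright; infer_instance

def pvWitness_exception_handling_leftright : Int × List Int := (4, [3, -1, 3, 2])

def Spec_exception_handling_leftright (N : Int) (A : List Int) (out : List Int) : Prop :=
  out = exception_handling_leftright_alt N A
instance (N : Int) (A : List Int) (out : List Int) : Decidable (Spec_exception_handling_leftright N A out) := by
  unfold Spec_exception_handling_leftright; infer_instance

-- ===== CLAIM (what is proved, stated in full; the proofs are below) =====
def Claim_equal_exception_handling_leftright : Prop :=
  ∀ (N : Int) (A : List Int), Dom_exception_handling_leftright N A →
    Pre_exception_handling_leftright N A →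
    Spec_exception_handling_leftright N A (exception_handling_leftright N A)

-- ===== LEMMAS AND PROOFS =====

-- clamped maximum of a list (max over the elements and 0)
def pvM (l : List Int) : Int := l.foldl max 0

theorem pvFoldl_max_max (l : List Int) : ∀ a b : Int, l.foldl max (max a b) = max a (l.foldl max b) := by
  induction l with
  | nil => intro a b; simp
  | cons x t ih => intro a b; simp only [List.foldl_cons, max_assoc, ih]

theorem pvM_nonneg (l : List Int) : 0 ≤ pvM l := by
  have h := pvFoldl_max_max l 0 0
  simp [pvM] at *; omega

theorem pvM_cons (x : Int) (l : List Int) : pvM (x :: l) = max x (pvM l) := by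
  simp only [pvM, List.foldl_cons]
  rw [max_comm 0 x, pvFoldl_max_max]

theorem pvM_append (l1 l2 : List Int) : pvM (l1 ++ l2) = max (pvM l1) (pvM l2) := by
  have h1 : max (l1.foldl max 0) 0 = l1.foldl max 0 := max_eq_left (pvM_nonneg l1)
  simp only [pvM, List.foldl_append]
  rw [← h1, pvFoldl_max_max, h1]

theorem pvM_concat (l : List Int) (x : Int) : pvM (l ++ [x]) = max (pvM l) x := by
  have := pvM_nonneg l
  rw [pvM_append]; simp [pvM] at *; omega

-- pvM in terms of List.max?
theorem pvM_eq_max? (l : List Int) : pvM l = max 0 (l.max?.getD 0) := by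
  induction l with
  | nil => simp [pvM]
  | cons x t ih =>
    rw [pvM_cons, ih]
    cases h : t.max? with
    | none => simp [h]; omega
    | some v => simp [h]; omega

theorem pvM_eq_of_mem_of_le (l : List Int) (m : Int) (hm : m ∈ l) (hb : ∀ y ∈ l, y ≤ m) :
    pvM l = max 0 m := by
  rw [pvM_eq_max?]
  cases h : l.max? with
  | none => rw [List.max?_eq_none_iff] at h; subst h; simp at hm
  | some v =>
    obtain ⟨hv, hvb⟩ := List.max?_eq_some_iff.mp h
    have h1 := hvb m hm
    have h2 := hb v hv
    have : v = m := le_antisymm h2 h1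
    simp [this]

theorem pvMax?_concat (t : List Int) (x : Int) :
    (t ++ [x]).max? = some (match t.max? with | none => x | some v => max v x) := by
  induction t with
  | nil => simp
  | cons y s ih =>
    rw [List.cons_append, List.max?_cons, ih, List.max?_cons]
    cases h : s.max? with
    | none =>
      have : s = [] := List.max?_eq_none_iff.mp h
      subst this; simp
    | some v => simp only [Option.elim_some]; congr 1; omega

-- characterisation of the top-two fold of B
theorem pvTopTwo_spec (l : List Int) :
    l.foldl pvTopTwoStep (none, 0, none) =
      match l.max? with
      | none => (none, 0, none)
      | some m => (some m, (l.count m : Int), (l.filter (fun y => decide (y < m))).max?) := by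
  induction l using List.reverseRecOn with
  | nil => simp
  | append_singleton t x ih =>
    rw [List.foldl_append, ih, pvMax?_concat t x]
    cases h : t.max? with
    | none =>
      have ht : t = [] := List.max?_eq_none_iff.mp h
      subst ht
      simp [pvTopTwoStep]
    | some m =>
      obtain ⟨hm, hb⟩ := List.max?_eq_some_iff.mp h
      dsimp only
      by_cases hmx : m < x
      · have hmax : max m x = x := by omega
        have hxt : x ∉ t := fun hx => absurd (hb x hx) (by omega)
        have hcnt : t.count x = 0 := List.count_eq_zero.mpr hxt
        have hfil : t.filter (fun y => decide (y < x)) = t :=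
          List.filter_eq_self.mpr (fun a ha => by simpa using lt_of_le_of_lt (hb a ha) hmx)
        simp [pvTopTwoStep, hmax, hmx, List.count_append, hcnt, List.filter_append, hfil, h]
      · by_cases hxm : x = m
        · subst hxm
          have hmax : max x x = x := by omega
          simp [pvTopTwoStep, List.count_append, List.filter_append]
        · have hxm' : x < m := by omega
          have hmax : max m x = m := by omega
          have hcnt : (t ++ [x]).count m = t.count m := by
            simp [List.count_append, hxm]
          have hfil : (t ++ [x]).filter (fun y => decide (y < m)) =
              t.filter (fun y => decide (y < m)) ++ [x] := by
            simp [List.filter_append, hxm']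
          rw [hmax, hcnt, hfil, pvMax?_concat]
          cases hs : (t.filter (fun y => decide (y < m))).max? with
          | none => simp [pvTopTwoStep, hmx, hxm]
          | some sv =>
            by_cases hsx : sv < x
            · have : max sv x = x := by omega
              simp [pvTopTwoStep, hmx, hxm, hsx, this]
            · have : max sv x = sv := by omega
              simp [pvTopTwoStep, hmx, hxm, hsx, this]

-- prefix-max array invariant for port A
theorem pvML_inv (A : List Int) (n : Nat) (hn : n ≤ A.length) (j : Nat) (hj : j + 1 ≤ n) :
    ((List.range j).map (fun k : Nat => ((1 : Int) + (k : Int)))).foldl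
      (fun ml i =>
        ml.set i.toNat (max (PySem.List.pyGetD ml (i - 1) 0) (PySem.List.pyGetD A (i - 1) 0)))
      (List.replicate n 0) =
    (List.range (j + 1)).map (fun i => pvM (List.take i A)) ++ List.replicate (n - (j + 1)) 0 := by
  induction j with
  | zero =>
    obtain ⟨n', rfl⟩ : ∃ n', n = n' + 1 := ⟨n - 1, by omega⟩
    simp [pvM, List.replicate_succ]
  | succ j ih =>
    rw [List.range_succ, List.map_append, List.foldl_append, ih (by omega)]
    simp only [List.map_cons, List.map_nil, List.foldl_cons, List.foldl_nil]
    have e1 : ((1 : Int) + (j : Int)) - 1 = ((j : Nat) : Int) := by omega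
    have e2 : ((1 : Int) + (j : Int)).toNat = j + 1 := by omega
    rw [e1, e2, PySem.List.pyGetD_natCast, PySem.List.pyGetD_natCast]
    have hjA : j < A.length := by omega
    have hgd : (((List.range (j + 1)).map (fun i => pvM (List.take i A))) ++
        List.replicate (n - (j + 1)) 0).getD j 0 = pvM (List.take j A) := by
      rw [List.getD_append _ _ _ _ (by simp)]
      exact PySem.List.getD_map_range _ _ _ _ (by omega)
    have hrep : List.replicate (n - (j + 1)) (0 : Int) =
        0 :: List.replicate (n - (j + 2)) 0 := by
      rw [← List.replicate_succ]; congr 1; omega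
    rw [hgd, List.getD_eq_getElem _ _ hjA, hrep, List.set_append]
    have hlen : ¬ (j + 1 < ((List.range (j + 1)).map (fun i => pvM (List.take i A))).length) := by
      simp
    rw [if_neg hlen]
    simp only [List.length_map, List.length_range]
    have htake : A.take (j + 1) = A.take j ++ [A[j]] := by
      rw [List.take_add_one, List.getElem?_eq_getElem hjA]; rfl
    have hval : max (pvM (List.take j A)) A[j] = pvM (List.take (j + 1) A) := by
      rw [htake, pvM_concat]
    rw [hval, List.range_succ (n := j + 1), List.map_append]
    simp

theorem pvML_spec (A : List Int) (n : Nat) (hn : n ≤ A.length) (h1 : 1 ≤ n) :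
    (PySem.List.pyRange 1 (n : Int) 1).foldl
      (fun ml i =>
        ml.set i.toNat (max (PySem.List.pyGetD ml (i - 1) 0) (PySem.List.pyGetD A (i - 1) 0)))
      (List.replicate n 0) =
    (List.range n).map (fun i => pvM (List.take i A)) := by
  rw [PySem.List.pyRange_one]
  have e : ((n : Int) - 1).toNat = n - 1 := by omega
  rw [e, pvML_inv A n hn (n - 1) (by omega)]
  have : n - 1 + 1 = n := by omega
  simp [this]

theorem pvGetD_append_cons (l1 l2 : List Int) (x d : Int) :
    (l1 ++ x :: l2).getD l1.length d = x := by
  rw [List.getD_eq_getElem _ _ (by simp)]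
  rw [List.getElem_append_right (by omega)]
  simp

theorem pvGetD_rep_append (k : Nat) (l2 : List Int) (x d : Int) :
    (List.replicate k (0 : Int) ++ x :: l2).getD k d = x := by
  have h := pvGetD_append_cons (List.replicate k 0) l2 x d
  rwa [List.length_replicate] at h

-- suffix-max array invariant for port A
theorem pvMR_inv (A : List Int) (n : Nat) (hn : n ≤ A.length) (h1 : 1 ≤ n) (j : Nat)
    (hj : j ≤ n - 1) :
    (((List.range' (n - 1 - j) j).map (fun k : Nat => (k : Int))).reverse).foldl
      (fun mr i =>
        mr.set i.toNat (max (PySem.List.pyGetD mr (i + 1) 0) (PySem.List.pyGetD A (i + 1) 0)))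
      (List.replicate n 0) =
    List.replicate (n - 1 - j) 0 ++
      (List.range' (n - 1 - j) (j + 1)).map (fun i => pvM (List.drop (i + 1) (List.take n A))) := by
  induction j with
  | zero =>
    have hd : List.drop (n - 1 + 1) (List.take n A) = [] := by
      apply List.drop_eq_nil_of_le
      simp; omega
    simp only [Nat.sub_zero, List.range'_zero, List.map_nil, List.reverse_nil, List.foldl_nil,
      zero_add, List.range'_one, List.map_cons, hd]
    rw [show pvM [] = 0 from rfl, ← List.replicate_succ']
    congr 1
    omega
  | succ j ih =>
    have hr : List.range' (n - 1 - (j + 1)) (j + 1) = (n - 2 - j) :: List.range' (n - 1 - j) j := by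
      have : n - 1 - (j + 1) = n - 2 - j := by omega
      rw [List.range'_succ, this, show n - 2 - j + 1 = n - 1 - j by omega]
    rw [hr]
    simp only [List.map_cons, List.reverse_cons, List.foldl_append, List.foldl_cons, List.foldl_nil]
    rw [ih (by omega)]
    have e1 : ((n - 2 - j : Nat) : Int) + 1 = ((n - 1 - j : Nat) : Int) := by omega
    have e2 : ((n - 2 - j : Nat) : Int).toNat = n - 2 - j := by omega
    have hsplit : List.range' (n - 1 - j) (j + 1) = (n - 1 - j) :: List.range' (n - j) j := by
      rw [List.range'_succ, show n - 1 - j + 1 = n - j by omega]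
    rw [e1, e2, PySem.List.pyGetD_natCast, hsplit, List.map_cons, pvGetD_rep_append]
    have hidx : n - 1 - j < A.length := by omega
    rw [PySem.List.pyGetD_natCast, List.getD_eq_getElem A 0 hidx]
    have hval : max (pvM (List.drop (n - 1 - j + 1) (List.take n A))) A[n - 1 - j] =
        pvM (List.drop (n - 2 - j + 1) (List.take n A)) := by
      have h2 : n - 2 - j + 1 = n - 1 - j := by omega
      have h3 : n - 1 - j < (List.take n A).length := by simp; omega
      rw [h2, List.drop_eq_getElem_cons h3, pvM_cons, List.getElem_take]
      omega
    rw [hval]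
    have hrep : List.replicate (n - 1 - j) (0 : Int) =
        List.replicate (n - 2 - j) 0 ++ [0] := by
      rw [← List.replicate_succ']; congr 1; omega
    rw [hrep, List.append_assoc, List.set_append]
    simp only [List.length_replicate, lt_irrefl, Nat.sub_self,
      List.singleton_append, List.set_cons_zero]
    have hr2 : List.range' (n - 1 - (j + 1)) (j + 1 + 1) =
        (n - 2 - j) :: (n - 1 - j) :: List.range' (n - j) j := by
      rw [List.range'_succ, show n - 1 - (j + 1) = n - 2 - j by omega,
        show n - 2 - j + 1 = n - 1 - j by omega, List.range'_succ,
        show n - 1 - j + 1 = n - j by omega]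
    rw [hr2]
    have h5 : n - 1 - (j + 1) = n - 2 - j := by omega
    rw [h5]
    simp

theorem pvMR_spec (A : List Int) (n : Nat) (hn : n ≤ A.length) (h1 : 1 ≤ n) :
    ((PySem.List.pyRange 0 ((n : Int) - 1) 1).reverse).foldl
      (fun mr i =>
        mr.set i.toNat (max (PySem.List.pyGetD mr (i + 1) 0) (PySem.List.pyGetD A (i + 1) 0)))
      (List.replicate n 0) =
    (List.range n).map (fun i => pvM (List.drop (i + 1) (List.take n A))) := by
  rw [PySem.List.pyRange_one]
  have e : ((n : Int) - 1 - 0).toNat = n - 1 := by omega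
  have hmap : (List.range ((n : Int) - 1 - 0).toNat).map (fun k : Nat => (0 : Int) + (k : Int)) =
      (List.range' (n - 1 - (n - 1)) (n - 1)).map (fun k : Nat => (k : Int)) := by
    rw [e, List.range_eq_range']
    simp
  rw [hmap, pvMR_inv A n hn h1 (n - 1) le_rfl]
  have h2 : n - 1 - (n - 1) = 0 := by omega
  have h3 : n - 1 + 1 = n := by omega
  rw [h2, h3, List.range_eq_range']
  simp

-- "max excluding index k" computed from the global top-two data agrees with
-- the prefix/suffix decomposition
theorem pvPointwise (l : List Int) (m : Int) (h : l.max? = some m) (k : Nat) (hk : k < l.length) :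
    (if (some l[k] == some m) && ((l.count m : Int) == 1) then
        match (l.filter (fun y => decide (y < m))).max? with
        | none => 0
        | some sv => max 0 sv
      else max 0 ((some m).getD 0))
    = max (pvM (l.take k)) (pvM (l.drop (k + 1))) := by
  obtain ⟨hm, hb⟩ := List.max?_eq_some_iff.mp h
  have hdec : l = l.take k ++ l[k] :: l.drop (k + 1) := by
    rw [← List.drop_eq_getElem_cons hk, List.take_append_drop]
  rw [← pvM_append]
  by_cases hcase : l[k] = m ∧ l.count m = 1
  · obtain ⟨hk1, hc1⟩ := hcase
    have hcnt : (l.take k).count m + (l.drop (k + 1)).count m = 0 := by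
      have := hc1
      rw [hdec] at this
      simp [List.count_append, hk1] at this
      omega
    have hnt : m ∉ l.take k := by
      intro hmem
      have := List.count_pos_iff.mpr hmem
      omega
    have hnd : m ∉ l.drop (k + 1) := by
      intro hmem
      have := List.count_pos_iff.mpr hmem
      omega
    have hlt : ∀ y ∈ l.take k ++ l.drop (k + 1), y < m := by
      intro y hy
      rcases List.mem_append.mp hy with hy' | hy'
      · have hyl : y ∈ l := by rw [hdec]; exact List.mem_append_left _ hy'
        have := hb y hyl
        rcases eq_or_lt_of_le this with rfl | h'
        · exact absurd hy' hnt
        · exact h'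
      · have hyl : y ∈ l := by
          rw [hdec]
          exact List.mem_append_right _ (List.mem_cons_of_mem _ hy')
        have := hb y hyl
        rcases eq_or_lt_of_le this with rfl | h'
        · exact absurd hy' hnd
        · exact h'
    have hfil : l.filter (fun y => decide (y < m)) = l.take k ++ l.drop (k + 1) := by
      conv_lhs => rw [hdec]
      rw [List.filter_append, List.filter_cons]
      rw [List.filter_eq_self.mpr (fun a ha => by
          simpa using hlt a (List.mem_append_left _ ha)),
        List.filter_eq_self.mpr (fun a ha => by
          simpa using hlt a (List.mem_append_right _ ha))]
      simp [hk1]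
    rw [if_pos (by simp [hk1, hc1]), hfil, pvM_eq_max?]
    cases hs : (l.take k ++ l.drop (k + 1)).max? with
    | none => simp
    | some sv => simp
  · have hcond : ((some l[k] == some m) && ((l.count m : Int) == 1)) = false := by
      rcases Decidable.not_and_iff_not_or_not.mp hcase with h' | h'
      · simp [h']
      · have : (l.count m : Int) ≠ 1 := by
          intro hx
          exact h' (by omega)
        simp [this]
    rw [hcond]
    have hmE : m ∈ l.take k ++ l.drop (k + 1) := by
      by_cases he : l[k] = m
      · have hc2 : l.count m ≠ 1 := fun hc => hcase ⟨he, hc⟩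
        have hpos : 0 < l.count m := List.count_pos_iff.mpr hm
        have : 0 < (l.take k).count m + (l.drop (k + 1)).count m := by
          have h6 := hc2
          rw [hdec] at hpos h6
          simp [List.count_append, he] at h6 hpos
          omega
        rcases Nat.lt_or_ge 0 ((l.take k).count m) with h' | h'
        · exact List.mem_append_left _ (List.count_pos_iff.mp h')
        · exact List.mem_append_right _ (List.count_pos_iff.mp (by omega))
      · have := hm
        rw [hdec] at this
        rcases List.mem_append.mp this with h' | h'
        · exact List.mem_append_left _ h'
        · rcases List.mem_cons.mp h' with h'' | h''
          · exact absurd h''.symm he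
          · exact List.mem_append_right _ h''
    have hbE : ∀ y ∈ l.take k ++ l.drop (k + 1), y ≤ m := by
      intro y hy
      apply hb
      rcases List.mem_append.mp hy with h' | h'
      · rw [hdec]; exact List.mem_append_left _ h'
      · rw [hdec]; exact List.mem_append_right _ (List.mem_cons_of_mem _ h')
    rw [pvM_eq_of_mem_of_le _ m hmE hbE]
    simp

-- the two ports, reduced to a common closed form on a positive size n
theorem pvA_eq (A : List Int) (n : Nat) (hn : n ≤ A.length) (h1 : 1 ≤ n) :
    exception_handling_leftright (n : Int) A =
      (List.range n).map
        (fun k => max (pvM (List.take k A)) (pvM (List.drop (k + 1) (List.take n A)))) := by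
  unfold exception_handling_leftright
  dsimp only [Int.toNat_natCast]
  rw [pvML_spec A n hn h1, pvMR_spec A n hn h1, PySem.List.pyRange_one]
  have e : ((n : Int) - 0).toNat = n := by omega
  rw [e, List.map_map]
  apply List.map_congr_left
  intro k hk
  have hk' : k < n := List.mem_range.mp hk
  have ez : (0 : Int) + (k : Int) = ((k : Nat) : Int) := by omega
  simp only [Function.comp_apply, ez, PySem.List.pyGetD_natCast]
  rw [PySem.List.getD_map_range _ _ _ _ hk', PySem.List.getD_map_range _ _ _ _ hk']

theorem pvB_eq (A : List Int) (n : Nat) (hn : n ≤ A.length) (h1 : 1 ≤ n) :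
    exception_handling_leftright_alt (n : Int) A =
      (List.range n).map
        (fun k => max (pvM (List.take k (A.take n))) (pvM (List.drop (k + 1) (A.take n)))) := by
  simp only [exception_handling_leftright_alt]
  have hmaxN : max (n : Int) 0 = (n : Int) := by omega
  rw [hmaxN,
    show PySem.List.slice A none (some ((n : Nat) : Int)) = A.take ((n : Nat) : Int).toNat from
      PySem.List.slice_to A (by positivity)]
  dsimp only [Int.toNat_natCast]
  have hxs : (A.take n).length = n := by simp [List.length_take]; omega
  cases hc : (A.take n).max? with
  | none =>
    have : A.take n = [] := List.max?_eq_none_iff.mp hc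
    rw [this] at hxs
    simp at hxs
    omega
  | some m =>
    simp only [pvTopTwo_spec, hc]
    apply List.ext_getElem
    · simp
      omega
    · intro i hi1 hi2
      simp only [List.getElem_map, List.getElem_range]
      have hi : i < (A.take n).length := by simp at hi1; omega
      have := pvPointwise (A.take n) m hc i hi
      simpa using this

-- ===== VERDICT (by name: the statement is the Claim_ definition above) =====
theorem exception_handling_leftright_spec : Claim_equal_exception_handling_leftright := by
  intro N A _ hpre
  unfold Spec_exception_handling_leftright
  by_cases hN : N ≤ 0
  · simp only [exception_handling_leftright, exception_handling_leftright_alt]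
    rw [PySem.List.pyRange_one_eq_nil (by omega : N ≤ 1),
      PySem.List.pyRange_one_eq_nil (by omega : N - 1 ≤ 0),
      PySem.List.pyRange_one_eq_nil (by omega : N ≤ 0),
      show max N 0 = 0 from by omega,
      show PySem.List.slice A none (some (0 : Int)) = A.take ((0 : Int)).toNat from
        PySem.List.slice_to A (le_refl 0)]
    simp
  · have hlen : N ≤ (A.length : Int) := by
      rcases hpre with h | h
      · omega
      · exact h
    have hNn : N = (N.toNat : Int) := by omega
    rw [hNn, pvA_eq A N.toNat (by omega) (by omega), pvB_eq A N.toNat (by omega) (by omega)]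
    apply List.map_congr_left
    intro k hk
    have hk' : k < N.toNat := List.mem_range.mp hk
    rw [List.take_take, min_eq_left (by omega)]
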